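-- pv_equiv track=rewrite | github.com/terminaldweller/colo | colo/colo.py | color_number
-- ===== SOURCE A (Python) =====
-- BASH_STR = "\x1b[38;5;XXXmcolourXXX YYY \x1b[0m\t"
--
-- def color_number(number_colo_list) -> str:
--     """print color numbers"""
--     print_list = str()
--     for i, number_colo in enumerate(number_colo_list):
--         if i % 12 == 0 and i != 0:
--             print_list += "\n"
--         print_list += BASH_STR.replace("XXX", number_colo).replace(
--             "YYY", number_colo
--         )
--     return print_list
-- ===== SOURCE B (Python) =====
-- BASH_STR = "\x1b[38;5;XXXmcolourXXX YYY \x1b[0m\t"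
--
-- def color_number(number_colo_list) -> str:
--     """print color numbers"""
--     def fmt(x):
--         return BASH_STR.replace("XXX", x).replace("YYY", x)
--     chunks = [
--         "".join(fmt(x) for x in number_colo_list[i:i + 12])
--         for i in range(0, len(number_colo_list), 12)
--     ]
--     return "\n".join(chunks)
-- ===== Notes on version B (the rewrite author's own statement) =====
-- stated objective: idiomatic
-- what changed: Replaces the indexed accumulator loop with an i%12 newline test by slicing the list into explicit 12-element chunks via range(0, len, 12), formatting each chunk with ''.join and joining the chunks with '\n'.join.
import Mathlib
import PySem

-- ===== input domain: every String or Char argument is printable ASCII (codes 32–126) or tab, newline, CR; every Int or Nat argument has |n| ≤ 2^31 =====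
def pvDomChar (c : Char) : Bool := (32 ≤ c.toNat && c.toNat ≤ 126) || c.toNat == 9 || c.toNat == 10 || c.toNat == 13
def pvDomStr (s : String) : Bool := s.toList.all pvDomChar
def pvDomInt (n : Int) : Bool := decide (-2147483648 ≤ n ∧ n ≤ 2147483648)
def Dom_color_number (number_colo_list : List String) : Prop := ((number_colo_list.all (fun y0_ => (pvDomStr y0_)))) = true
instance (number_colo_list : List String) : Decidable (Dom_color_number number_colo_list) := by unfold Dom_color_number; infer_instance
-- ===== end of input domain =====

-- B re-implements A by slicing the list into 12-element chunks and joining per-chunk strings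
-- with "\n" (idiomatic join-of-chunks instead of an indexed accumulator loop); same return value.

-- ===== PORT A =====
-- BASH_STR (module constant), as a list of code points
def pvBashStr : List Char := "\x1b[38;5;XXXmcolourXXX YYY \x1b[0m\t".toList

-- A: indexed loop, '+=' accumulation on the char-list side, String.ofList at the end
def color_number (number_colo_list : List String) : String :=
  String.ofList ((PySem.List.enumerate number_colo_list).foldl
    (fun print_list p =>
      (if PySem.Int.mod p.1 12 == 0 && p.1 != 0 then print_list ++ ['\n'] else print_list)
      ++ PySem.Chars.replace (PySem.Chars.replace pvBashStr "XXX".toList p.2.toList)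
          "YYY".toList p.2.toList)
    [])

-- ===== PORT B =====
-- fmt(x) = BASH_STR.replace("XXX", x).replace("YYY", x)
def pvFmt (x : String) : List Char :=
  PySem.Chars.replace (PySem.Chars.replace pvBashStr "XXX".toList x.toList) "YYY".toList x.toList

-- B: chunks of 12 via range(0, len, 12) and slicing; '' -join inside a chunk, '\n'-join between chunks
def color_number_alt (number_colo_list : List String) : String :=
  String.ofList (PySem.Chars.join ['\n']
    ((PySem.List.pyRange 0 (PySem.List.len number_colo_list) 12).map
      (fun i => PySem.Chars.join []
        ((PySem.List.slice number_colo_list (some i) (some (i + 12))).map pvFmt))))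

-- ===== PRECONDITION & SPEC =====
def Spec_color_number (number_colo_list : List String) (out : String) : Prop := out = color_number_alt number_colo_list
instance (number_colo_list : List String) (out : String) : Decidable (Spec_color_number number_colo_list out) := by unfold Spec_color_number; infer_instance

-- ===== CLAIM (what is proved, stated in full; the proofs are below) =====
def Claim_equal_color_number : Prop := ∀ (number_colo_list : List String), Dom_color_number number_colo_list → Spec_color_number number_colo_list (color_number number_colo_list)

-- ===== LEMMAS AND PROOFS =====

-- A's loop body re-indexed with a Nat counter
def pvBodyA : List String → Nat → List Char
  | [], _ => []
  | x :: t, k => (if k % 12 == 0 && k != 0 then ['\n'] else []) ++ pvFmt x ++ pvBodyA t (k + 1)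

-- common chunk-recursive characterisation of the output
def pvChunk (l : List String) : List Char :=
  if l = [] then [] else
    (l.take 12).flatMap pvFmt ++
      (if l.drop 12 = [] then [] else '\n' :: pvChunk (l.drop 12))
termination_by l.length
decreasing_by cases l with
  | nil => simp_all
  | cons a t => simp

lemma pvJoinEmpty (ps : List (List Char)) : PySem.Chars.join [] ps = ps.flatten := by
  induction ps with
  | nil => rfl
  | cons a t ih =>
    cases t with
    | nil => simp [PySem.Chars.join_singleton]
    | cons b u => rw [PySem.Chars.join_cons_cons]; simp_all

lemma pvFoldA_eq (m : List String) : ∀ (k : Nat) (acc : List Char),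
    (PySem.List.enumerate m (k : Int)).foldl
      (fun print_list p =>
        (if PySem.Int.mod p.1 12 == 0 && p.1 != 0 then print_list ++ ['\n'] else print_list)
        ++ PySem.Chars.replace (PySem.Chars.replace pvBashStr "XXX".toList p.2.toList)
            "YYY".toList p.2.toList)
      acc
    = acc ++ pvBodyA m k := by
  induction m with
  | nil => intro k acc; simp [PySem.List.enumerate, pvBodyA]
  | cons x t ih =>
    intro k acc
    rw [PySem.List.enumerate_cons]
    have hk1 : ((k : Int) + 1) = ((k + 1 : Nat) : Int) := by push_cast; ring
    have hmod : PySem.Int.mod (k : Int) 12 = ((k % 12 : Nat) : Int) := by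
      exact_mod_cast PySem.Int.mod_natCast k 12
    simp only [List.foldl_cons, hk1, ih, pvBodyA, pvFmt, hmod]
    by_cases h0 : k % 12 = 0 <;> by_cases h1 : k = 0 <;> (simp [h0, h1]; try omega)

lemma pvRun : ∀ (r : Nat), ∀ (m : List String) (k : Nat), r + k % 12 = 12 → r < 12 →
    pvBodyA m k = (m.take r).flatMap pvFmt ++ pvBodyA (m.drop r) (k + r) := by
  intro r
  induction r with
  | zero => intro m k h _; omega
  | succ r ih =>
    intro m k h hr
    cases m with
    | nil => simp [pvBodyA]
    | cons x t =>
      have hne : ¬ (k % 12 == 0 && k != 0) = true := by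
        simp; intro h0; omega
      rw [pvBodyA, if_neg hne]
      cases Nat.eq_zero_or_pos r with
      | inl h0 =>
        subst h0
        simp
      | inr hpos =>
        rw [ih t (k + 1) (by omega) (by omega)]
        simp [Nat.add_assoc, Nat.add_comm 1 r]

lemma pvBoundary : ∀ (n : Nat) (m : List String), m.length ≤ n → ∀ k : Nat, 0 < k → k % 12 = 0 →
    pvBodyA m k = if m = [] then [] else '\n' :: pvChunk m := by
  intro n
  induction n with
  | zero =>
    intro m hm k _ _
    have : m = [] := by cases m <;> simp_all
    subst this; simp [pvBodyA]
  | succ n ih =>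
    intro m hm k hk hk12
    cases m with
    | nil => simp [pvBodyA]
    | cons x t =>
      have hcond : (k % 12 == 0 && k != 0) = true := by simp; omega
      rw [pvBodyA, if_pos hcond, pvRun 11 t (k + 1) (by omega) (by omega),
        ih (t.drop 11) (by simp at hm ⊢; omega) (k + 1 + 11) (by omega) (by omega)]
      conv_rhs => rw [pvChunk]
      rw [if_neg (List.cons_ne_nil x t),
        show (x :: t).take 12 = x :: t.take 11 from by
          rw [show (12 : Nat) = 11 + 1 from rfl, List.take_succ_cons],
        show (x :: t).drop 12 = t.drop 11 from by
          rw [show (12 : Nat) = 11 + 1 from rfl, List.drop_succ_cons]]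
      rcases (show t.drop 11 = [] ∨ t.drop 11 ≠ [] from em _) with h | h <;> simp [h]

lemma pvA_eq_chunk (l : List String) : pvBodyA l 0 = pvChunk l := by
  cases l with
  | nil => simp [pvBodyA, pvChunk]
  | cons x t =>
    rw [pvBodyA, if_neg (by simp), pvRun 11 t 1 (by omega) (by omega),
      pvBoundary (t.drop 11).length (t.drop 11) (le_refl _) 12 (by omega) (by omega)]
    conv_rhs => rw [pvChunk]
    rw [if_neg (List.cons_ne_nil x t),
      show (x :: t).take 12 = x :: t.take 11 from by
        rw [show (12 : Nat) = 11 + 1 from rfl, List.take_succ_cons],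
      show (x :: t).drop 12 = t.drop 11 from by
        rw [show (12 : Nat) = 11 + 1 from rfl, List.drop_succ_cons]]
    rcases (show t.drop 11 = [] ∨ t.drop 11 ≠ [] from em _) with h | h <;> simp [h]

lemma pvRange12 (n : Nat) (h : 0 < n) :
    PySem.List.pyRange 0 (n : Int) 12
      = 0 :: (PySem.List.pyRange 0 ((n : Int) - 12) 12).map (· + 12) := by
  rw [PySem.List.pyRange_of_pos _ _ (by norm_num), PySem.List.pyRange_of_pos _ _ (by norm_num)]
  have hc : (((n : Int) - 0 + 12 - 1) / 12).toNat
      = (if (0:Int) < (n : Int) - 12 then ((((n : Int) - 12) - 0 + 12 - 1) / 12).toNat else 0) + 1 := by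
    split <;> omega
  rw [if_pos (by exact_mod_cast h), hc]
  split
  · rw [List.range_succ_eq_map, List.map_cons, List.map_map, List.map_map]
    simp only [Nat.cast_zero, mul_zero, add_zero, List.cons.injEq, true_and]
    apply List.map_congr_left
    intro k _
    simp [Function.comp]
    ring
  · simp

lemma pvJoinCons (sep a : List Char) (ps : List (List Char)) :
    PySem.Chars.join sep (a :: ps)
      = a ++ (if ps = [] then [] else sep ++ PySem.Chars.join sep ps) := by
  cases ps with
  | nil => simp [PySem.Chars.join_singleton]
  | cons b u => rw [PySem.Chars.join_cons_cons]; simp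

lemma pvChunk0 (l : List String) :
    PySem.Chars.join [] ((PySem.List.slice l (some 0) (some (0 + 12))).map pvFmt)
      = (l.take 12).flatMap pvFmt := by
  rw [pvJoinEmpty, PySem.List.slice_zero_start, PySem.List.slice_to _ (by norm_num),
    List.flatMap_def]
  simp

lemma pvB_eq_chunk : ∀ (fuel : Nat) (l : List String), l.length ≤ fuel →
    PySem.Chars.join ['\n']
      ((PySem.List.pyRange 0 ((l.length : Int)) 12).map
        (fun i => PySem.Chars.join []
          ((PySem.List.slice l (some i) (some (i + 12))).map pvFmt)))
    = pvChunk l := by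
  intro fuel
  induction fuel with
  | zero =>
    intro l hl
    have : l = [] := by cases l <;> simp_all
    subst this
    rw [PySem.List.pyRange_of_pos _ _ (by norm_num)]
    simp [PySem.Chars.join_nil, pvChunk]
  | succ fuel ih =>
    intro l hl
    rcases (show l = [] ∨ l ≠ [] from em _) with hnil | hnil
    · subst hnil
      rw [PySem.List.pyRange_of_pos _ _ (by norm_num)]
      simp [PySem.Chars.join_nil, pvChunk]
    · have hL : 0 < l.length := List.length_pos_iff.mpr hnil
      rw [pvRange12 l.length hL, List.map_cons, pvChunk0, List.map_map]
      have hshift : ((PySem.List.pyRange 0 ((l.length : Int) - 12) 12).map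
            ((fun i => PySem.Chars.join []
              ((PySem.List.slice l (some i) (some (i + 12))).map pvFmt)) ∘ (· + 12)))
          = (PySem.List.pyRange 0 ((l.length : Int) - 12) 12).map
            (fun j => PySem.Chars.join []
              ((PySem.List.slice (l.drop 12) (some j) (some (j + 12))).map pvFmt)) := by
        apply List.map_congr_left
        intro j hj
        obtain ⟨hj0, -, -⟩ := (PySem.List.mem_pyRange_iff_of_pos (by norm_num) j).mp hj
        obtain ⟨m, rfl⟩ : ∃ m : Nat, (m : Int) = j := ⟨j.toNat, by omega⟩
        simp only [Function.comp]
        have h1 : (m : Int) + 12 = ((m + 12 : Nat) : Int) := by push_cast; ring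
        have h2 : ((m + 12 : Nat) : Int) + 12 = ((m + 12 : Nat) : Int) + ((12 : Nat) : Int) := by
          norm_num
        rw [h1, h2, PySem.List.slice_natCast_add,
          show ((m + 12 : Nat) : Int) = (m : Int) + ((12 : Nat) : Int) from by norm_num,
          PySem.List.slice_natCast_add, List.drop_drop, Nat.add_comm 12 m]
      rw [hshift]
      rcases Nat.lt_or_ge 12 l.length with h12 | h12
      · -- more than one chunk
        have hcast : ((l.length : Int) - 12) = (((l.drop 12).length : Nat) : Int) := by
          simp; omega
        rw [hcast, pvJoinCons]
        have hd : (l.drop 12).length ≠ 0 := by simp; omega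
        have hne : ((PySem.List.pyRange 0 (((l.drop 12).length : Nat) : Int) 12).map
            (fun j => PySem.Chars.join []
              ((PySem.List.slice (l.drop 12) (some j) (some (j + 12))).map pvFmt))) ≠ [] := by
          rw [pvRange12 _ (by omega)]
          simp
        rw [if_neg hne, ih (l.drop 12) (by simp; omega)]
        conv_rhs => rw [pvChunk]
        rw [if_neg hnil, if_neg (by simp; omega)]
        simp
      · -- single chunk
        have hre : PySem.List.pyRange 0 ((l.length : Int) - 12) 12 = [] := by
          rw [PySem.List.pyRange_of_pos _ _ (by norm_num), if_neg (by omega)]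
          simp
        rw [hre, List.map_nil, PySem.Chars.join_singleton]
        conv_rhs => rw [pvChunk]
        rw [if_neg hnil, if_pos (by simp; omega), List.append_nil]

-- ===== VERDICT (by name: the statement is the Claim_ definition above) =====
theorem color_number_spec : Claim_equal_color_number := by
  intro l _
  unfold Spec_color_number color_number color_number_alt
  have hA := pvFoldA_eq l 0 []
  simp only [Nat.cast_zero] at hA
  rw [hA, List.nil_append, pvA_eq_chunk]
  have hB := pvB_eq_chunk l.length l (le_refl _)
  simp only [PySem.List.len_eq] at *
  rw [hB]
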